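-- pv_equiv track=rewrite | github.com/RainbowRedux/RainbowSixFileConverters | BinaryConversionUtilities.py | calc_bitmasks_ARGB_color
-- ===== SOURCE A (Python) =====
-- previousMasks = {}
--
-- def calc_bitmasks_ARGB_color(bdR, bdG, bdB, bdA):
--     key = str(bdA) + str(bdR) + str(bdG) + str(bdB)
--     if key in previousMasks:
--         masks = previousMasks[key]
--         return masks
--
--     redMask = 0
--     greenMask = 0
--     blueMask = 0
--     alphaMask = 0
--
--     if bdA > 0:
--         for i in range(bdA):
--             alphaMask = (alphaMask << 1) + 1
--         alphaMask = alphaMask << (bdR + bdG + bdB)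
--
--     for i in range(bdR):
--         redMask = (redMask << 1) + 1
--     redMask = redMask << (bdG + bdB)
--
--     greenMask = 0
--     for i in range(bdG):
--         greenMask = (greenMask << 1) + 1
--     greenMask = greenMask << (bdB)
--
--     blueMask = 0
--     for i in range(bdB):
--         blueMask = (blueMask << 1) + 1
--
--     masks = [redMask, greenMask, blueMask, alphaMask]
--     previousMasks[key] = masks
--     return masks
-- ===== SOURCE B (Python) =====
-- previousMasks = {}
--
-- def calc_bitmasks_ARGB_color(bdR, bdG, bdB, bdA):
--     key = str(bdA) + str(bdR) + str(bdG) + str(bdB)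
--     if key in previousMasks:
--         return previousMasks[key]
--
--     def mask(bd):
--         return (1 << bd) - 1 if bd > 0 else 0
--
--     blueMask = mask(bdB)
--     greenMask = mask(bdG) << bdB
--     redMask = mask(bdR) << (bdG + bdB)
--     alphaMask = mask(bdA) << (bdR + bdG + bdB) if bdA > 0 else 0
--
--     masks = [redMask, greenMask, blueMask, alphaMask]
--     previousMasks[key] = masks
--     return masks
-- ===== Notes on version B (the rewrite author's own statement) =====
-- stated objective: simpler
-- what changed: Each per-channel bit-building loop ((m<<1)+1 repeated bd times, then shifted) is replaced by the closed form (1<<bd)-1 shifted into place; the cache and key are kept unchanged.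
import Mathlib
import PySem

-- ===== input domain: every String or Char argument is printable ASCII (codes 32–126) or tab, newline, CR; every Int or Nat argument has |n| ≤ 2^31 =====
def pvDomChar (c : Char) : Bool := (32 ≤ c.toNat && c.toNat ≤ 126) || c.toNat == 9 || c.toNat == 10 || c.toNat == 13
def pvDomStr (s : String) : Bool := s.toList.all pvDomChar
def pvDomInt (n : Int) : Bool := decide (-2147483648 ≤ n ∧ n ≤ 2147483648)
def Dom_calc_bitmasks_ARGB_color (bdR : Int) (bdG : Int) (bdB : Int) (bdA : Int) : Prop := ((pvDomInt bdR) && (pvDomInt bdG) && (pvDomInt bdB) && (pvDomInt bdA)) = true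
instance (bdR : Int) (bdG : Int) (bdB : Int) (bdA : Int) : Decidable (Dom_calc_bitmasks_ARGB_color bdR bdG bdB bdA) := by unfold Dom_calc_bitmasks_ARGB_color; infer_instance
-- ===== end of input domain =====

-- B replaces A's three/four bit-accumulating loops by closed-form masks ((1<<bd)-1, shifted);
-- objective: simpler.  The module-level cache in both Pythons only memoises identical values, so
-- the RETURN value of a single call is what is ported and proved here.

-- ===== PORT A =====
-- each "for i in range(bd): m = (m << 1) + 1" loop, step for step
def calc_bitmasks_ARGB_color (bdR : Int) (bdG : Int) (bdB : Int) (bdA : Int) : List Int :=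
  let alphaMask : Int :=
    if bdA > 0 then
      ((PySem.List.pyRange 0 bdA 1).foldl (fun (m : Int) (_ : Int) => (m <<< (1:Nat)) + 1) 0) <<< (bdR + bdG + bdB).toNat
    else 0
  let redMask : Int :=
    ((PySem.List.pyRange 0 bdR 1).foldl (fun (m : Int) (_ : Int) => (m <<< (1:Nat)) + 1) 0) <<< (bdG + bdB).toNat
  let greenMask : Int :=
    ((PySem.List.pyRange 0 bdG 1).foldl (fun (m : Int) (_ : Int) => (m <<< (1:Nat)) + 1) 0) <<< bdB.toNat
  let blueMask : Int :=
    (PySem.List.pyRange 0 bdB 1).foldl (fun (m : Int) (_ : Int) => (m <<< (1:Nat)) + 1) 0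
  [redMask, greenMask, blueMask, alphaMask]

-- ===== PORT B =====
-- Source B's helper: mask(bd) = (1 << bd) - 1 if bd > 0 else 0
def pvMask (bd : Int) : Int := if bd > 0 then ((1 : Int) <<< bd.toNat) - 1 else 0

def calc_bitmasks_ARGB_color_alt (bdR : Int) (bdG : Int) (bdB : Int) (bdA : Int) : List Int :=
  let blueMask : Int := pvMask bdB
  let greenMask : Int := pvMask bdG <<< bdB.toNat
  let redMask : Int := pvMask bdR <<< (bdG + bdB).toNat
  let alphaMask : Int := if bdA > 0 then pvMask bdA <<< (bdR + bdG + bdB).toNat else 0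
  [redMask, greenMask, blueMask, alphaMask]

-- ===== PRECONDITION & SPEC =====
-- Pre_ excludes exactly the inputs on which Python A raises ValueError ("negative shift count"):
-- a negative shift amount bdB, bdG+bdB, or (when bdA > 0) bdR+bdG+bdB.
def Pre_calc_bitmasks_ARGB_color (bdR : Int) (bdG : Int) (bdB : Int) (bdA : Int) : Prop :=
  0 ≤ bdB ∧ 0 ≤ bdG + bdB ∧ (0 < bdA → 0 ≤ bdR + bdG + bdB)
instance (bdR : Int) (bdG : Int) (bdB : Int) (bdA : Int) : Decidable (Pre_calc_bitmasks_ARGB_color bdR bdG bdB bdA) := by unfold Pre_calc_bitmasks_ARGB_color; infer_instance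

def pvWitness_calc_bitmasks_ARGB_color : Int × Int × Int × Int := (5, 6, 5, 0)

def Spec_calc_bitmasks_ARGB_color (bdR : Int) (bdG : Int) (bdB : Int) (bdA : Int) (out : List Int) : Prop := out = calc_bitmasks_ARGB_color_alt bdR bdG bdB bdA
instance (bdR : Int) (bdG : Int) (bdB : Int) (bdA : Int) (out : List Int) : Decidable (Spec_calc_bitmasks_ARGB_color bdR bdG bdB bdA out) := by unfold Spec_calc_bitmasks_ARGB_color; infer_instance

-- ===== CLAIM (what is proved, stated in full; the proofs are below) =====
def Claim_equal_calc_bitmasks_ARGB_color : Prop := ∀ (bdR : Int) (bdG : Int) (bdB : Int) (bdA : Int), Dom_calc_bitmasks_ARGB_color bdR bdG bdB bdA → Pre_calc_bitmasks_ARGB_color bdR bdG bdB bdA → Spec_calc_bitmasks_ARGB_color bdR bdG bdB bdA (calc_bitmasks_ARGB_color bdR bdG bdB bdA)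

-- ===== LEMMAS AND PROOFS =====

-- A's loop "for i in range(n): m = (m << 1) + 1" starting from m over n iterations
theorem pvLoop_aux (k : Nat) (m : Int) :
    (PySem.List.pyRange 0 (k : Int) 1).foldl (fun (m : Int) (_ : Int) => (m <<< (1:Nat)) + 1) m
      = m * 2 ^ k + (2 ^ k - 1) := by
  induction k generalizing m with
  | zero => simp [PySem.List.pyRange]
  | succ n ih =>
      rw [show ((n + 1 : Nat) : Int) = (n : Int) + 1 by push_cast; ring,
          PySem.List.pyRange_one_succ_right (by positivity), List.foldl_append, ih]
      simp [Int.shiftLeft_eq, pow_succ]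
      ring

-- A's loop equals Source B's mask helper
theorem pvLoop_eq_mask (n : Int) :
    (PySem.List.pyRange 0 n 1).foldl (fun (m : Int) (_ : Int) => (m <<< (1:Nat)) + 1) 0 = pvMask n := by
  unfold pvMask
  by_cases h : 0 < n
  · rw [show n = ((n.toNat : Nat) : Int) by omega, pvLoop_aux, Int.shiftLeft_eq]
    split_ifs with h'
    · rw [Int.toNat_natCast]; ring
    · omega
  · have : PySem.List.pyRange 0 n 1 = [] := by
      simp [PySem.List.pyRange]; omega
    simp [this, if_neg h]

-- ===== VERDICT (by name: the statement is the Claim_ definition above) =====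
theorem calc_bitmasks_ARGB_color_spec : Claim_equal_calc_bitmasks_ARGB_color := by
  intro bdR bdG bdB bdA _ _
  unfold Spec_calc_bitmasks_ARGB_color calc_bitmasks_ARGB_color calc_bitmasks_ARGB_color_alt
  simp only [pvLoop_eq_mask]
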